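-- pv_equiv track=rewrite | github.com/damienvermeer/opennemsld | src/corner_minimise.py | segment_to_path
-- ===== SOURCE A (Python) =====
-- def segment_to_path(
--     segment_in: list[tuple[int, int]], starting_point: tuple[int, int]
-- ) -> list[tuple[int, int]]:
--     """Converts a condensed segment list back into a full path of absolute coordinates.
--
--     This is the inverse of steps_to_segments. Converts a list like [(2, 0), (0, 2)]
--     back into [(0, 0), (1, 0), (2, 0), (2, 1), (2, 2)].
--
--     Args:
--         segment_in: Condensed segment list with relative movements
--
--     Returns:
--         list[tuple[int, int]]: Full path as absolute coordinates
--     """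
--     if len(segment_in) == 0:
--         return [starting_point]
--
--     path = [starting_point]  # Start at origin
--     current_x, current_y = starting_point[0], starting_point[1]
--
--     for dx, dy in segment_in:
--         # Determine the direction and number of steps
--         if dx != 0:
--             # Horizontal movement
--             step_x = 1 if dx > 0 else -1
--             num_steps = abs(dx)
--             for _ in range(num_steps):
--                 current_x += step_x
--                 path.append((current_x, current_y))
--         elif dy != 0:
--             # Vertical movement
--             step_y = 1 if dy > 0 else -1
--             num_steps = abs(dy)
--             for _ in range(num_steps):
--                 current_y += step_y
--                 path.append((current_x, current_y))
--
--     return path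
-- ===== SOURCE B (Python) =====
-- def segment_to_path(segment_in, starting_point):
--     # Two passes: flatten segments into unit-step deltas, then cumulative-sum scan.
--     deltas = []
--     for dx, dy in segment_in:
--         if dx != 0:
--             deltas.extend([(1 if dx > 0 else -1, 0)] * abs(dx))
--         elif dy != 0:
--             deltas.extend([(0, 1 if dy > 0 else -1)] * abs(dy))
--     path = [starting_point]
--     for d in deltas:
--         last = path[-1]
--         path.append((last[0] + d[0], last[1] + d[1]))
--     return path
-- ===== Notes on version B (the rewrite author's own statement) =====
-- stated objective: alternative
-- what changed: Replaces A's single traversal with nested per-segment stepping loops mutating (current_x, current_y) by two passes: first flatten the segments into a list of unit step vectors, then produce the path as a cumulative-sum scan from starting_point.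
import Mathlib
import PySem

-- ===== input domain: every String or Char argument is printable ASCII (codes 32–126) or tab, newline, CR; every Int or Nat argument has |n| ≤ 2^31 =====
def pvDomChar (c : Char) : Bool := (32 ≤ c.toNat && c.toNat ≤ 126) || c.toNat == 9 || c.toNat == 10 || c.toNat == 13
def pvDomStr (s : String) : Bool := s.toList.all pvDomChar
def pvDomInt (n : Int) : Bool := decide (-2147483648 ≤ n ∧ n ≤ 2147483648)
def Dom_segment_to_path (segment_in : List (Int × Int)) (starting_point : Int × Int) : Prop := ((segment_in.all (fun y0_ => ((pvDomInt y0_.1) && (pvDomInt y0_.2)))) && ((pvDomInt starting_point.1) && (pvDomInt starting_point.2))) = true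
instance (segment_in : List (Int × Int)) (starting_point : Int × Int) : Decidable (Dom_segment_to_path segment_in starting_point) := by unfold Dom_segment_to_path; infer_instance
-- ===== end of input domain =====

-- B replaces A's nested per-segment stepping loops with two passes (flatten into unit
-- deltas, then a cumulative-sum scan); same cost, different decomposition.

-- ===== PORT A =====
-- inner 'for _ in range(num_steps)' loop of the horizontal branch
def pvRunX (n : Nat) (sx : Int) (cx cy : Int) (path : List (Int × Int)) : Int × Int × List (Int × Int) :=
  match n with
  | 0 => (cx, cy, path)
  | k + 1 => pvRunX k sx (cx + sx) cy (path ++ [(cx + sx, cy)])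

-- inner 'for _ in range(num_steps)' loop of the vertical branch
def pvRunY (n : Nat) (sy : Int) (cx cy : Int) (path : List (Int × Int)) : Int × Int × List (Int × Int) :=
  match n with
  | 0 => (cx, cy, path)
  | k + 1 => pvRunY k sy cx (cy + sy) (path ++ [(cx, cy + sy)])

-- body of A's 'for dx, dy in segment_in' loop; state = (current_x, current_y, path)
def pvStepA (st : Int × Int × List (Int × Int)) (seg : Int × Int) : Int × Int × List (Int × Int) :=
  let (cx, cy, path) := st
  if seg.1 ≠ 0 then
    pvRunX seg.1.natAbs (if seg.1 > 0 then 1 else -1) cx cy path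
  else if seg.2 ≠ 0 then
    pvRunY seg.2.natAbs (if seg.2 > 0 then 1 else -1) cx cy path
  else st

def segment_to_path (segment_in : List (Int × Int)) (starting_point : Int × Int) : List (Int × Int) :=
  if segment_in.length = 0 then [starting_point]
  else
    (segment_in.foldl pvStepA (starting_point.1, starting_point.2, [starting_point])).2.2

-- ===== PORT B =====
-- the per-segment unit-delta block ('[(±1,0)]*abs(dx)' / '[(0,±1)]*abs(dy)')
def pvSegDeltas (seg : Int × Int) : List (Int × Int) :=
  if seg.1 ≠ 0 then List.replicate seg.1.natAbs ((if seg.1 > 0 then (1 : Int) else -1), (0 : Int))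
  else if seg.2 ≠ 0 then List.replicate seg.2.natAbs ((0 : Int), (if seg.2 > 0 then (1 : Int) else -1))
  else []

-- body of B's scan loop: append path[-1] + d
def pvStepB (p : List (Int × Int)) (d : Int × Int) : List (Int × Int) :=
  let last := p.getLast?.getD (0, 0)   -- path[-1]; path is never empty, so the default is never used
  p ++ [(last.1 + d.1, last.2 + d.2)]

def segment_to_path_alt (segment_in : List (Int × Int)) (starting_point : Int × Int) : List (Int × Int) :=
  let deltas := segment_in.foldl (fun acc seg => acc ++ pvSegDeltas seg) []
  deltas.foldl pvStepB [starting_point]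

-- ===== PRECONDITION & SPEC =====
def Spec_segment_to_path (segment_in : List (Int × Int)) (starting_point : Int × Int) (out : List (Int × Int)) : Prop := out = segment_to_path_alt segment_in starting_point
instance (segment_in : List (Int × Int)) (starting_point : Int × Int) (out : List (Int × Int)) : Decidable (Spec_segment_to_path segment_in starting_point out) := by unfold Spec_segment_to_path; infer_instance

-- ===== CLAIM (what is proved, stated in full; the proofs are below) =====
def Claim_equal_segment_to_path : Prop := ∀ (segment_in : List (Int × Int)) (starting_point : Int × Int), Dom_segment_to_path segment_in starting_point → Spec_segment_to_path segment_in starting_point (segment_to_path segment_in starting_point)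

-- ===== LEMMAS AND PROOFS =====

-- cumulative-sum scan of a delta list from point c (reference shape for both ports)
def pvScan (c : Int × Int) : List (Int × Int) → List (Int × Int)
  | [] => []
  | d :: ds => (c.1 + d.1, c.2 + d.2) :: pvScan (c.1 + d.1, c.2 + d.2) ds

-- endpoint after applying a delta list from point c
def pvEnd (c : Int × Int) : List (Int × Int) → Int × Int
  | [] => c
  | d :: ds => pvEnd (c.1 + d.1, c.2 + d.2) ds

theorem pvScan_append (ds es : List (Int × Int)) : ∀ c : Int × Int,
    pvScan c (ds ++ es) = pvScan c ds ++ pvScan (pvEnd c ds) es := by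
  induction ds with
  | nil => intro c; simp [pvScan, pvEnd]
  | cons d ds ih => intro c; simp [pvScan, pvEnd, ih]

theorem pvEnd_append (ds es : List (Int × Int)) : ∀ c : Int × Int,
    pvEnd c (ds ++ es) = pvEnd (pvEnd c ds) es := by
  induction ds with
  | nil => intro c; simp [pvEnd]
  | cons d ds ih => intro c; simp [pvEnd, ih]

theorem pvRunX_eq (sx : Int) : ∀ (n : Nat) (cx cy : Int) (path : List (Int × Int)),
    pvRunX n sx cx cy path =
      ((pvEnd (cx, cy) (List.replicate n (sx, 0))).1,
       (pvEnd (cx, cy) (List.replicate n (sx, 0))).2,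
       path ++ pvScan (cx, cy) (List.replicate n (sx, 0))) := by
  intro n
  induction n with
  | zero => intro cx cy path; simp [pvRunX, pvEnd, pvScan]
  | succ k ih =>
      intro cx cy path
      simp [pvRunX, List.replicate_succ, pvEnd, pvScan, ih]

theorem pvRunY_eq (sy : Int) : ∀ (n : Nat) (cx cy : Int) (path : List (Int × Int)),
    pvRunY n sy cx cy path =
      ((pvEnd (cx, cy) (List.replicate n (0, sy))).1,
       (pvEnd (cx, cy) (List.replicate n (0, sy))).2,
       path ++ pvScan (cx, cy) (List.replicate n (0, sy))) := by
  intro n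
  induction n with
  | zero => intro cx cy path; simp [pvRunY, pvEnd, pvScan]
  | succ k ih =>
      intro cx cy path
      simp [pvRunY, List.replicate_succ, pvEnd, pvScan, ih]

theorem pvStepA_eq (st : Int × Int × List (Int × Int)) (seg : Int × Int) :
    pvStepA st seg =
      ((pvEnd (st.1, st.2.1) (pvSegDeltas seg)).1,
       (pvEnd (st.1, st.2.1) (pvSegDeltas seg)).2,
       st.2.2 ++ pvScan (st.1, st.2.1) (pvSegDeltas seg)) := by
  obtain ⟨cx, cy, path⟩ := st
  by_cases h1 : seg.1 ≠ 0
  · simp [pvStepA, pvSegDeltas, h1, pvRunX_eq]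
  · by_cases h2 : seg.2 ≠ 0
    · simp [pvStepA, pvSegDeltas, h1, h2, pvRunY_eq]
    · simp [pvStepA, pvSegDeltas, h1, h2, pvEnd, pvScan]

-- A's main loop produces the scan of the flattened delta list
theorem pvFoldA_eq (segs : List (Int × Int)) : ∀ (cx cy : Int) (path : List (Int × Int)),
    segs.foldl pvStepA (cx, cy, path) =
      ((pvEnd (cx, cy) (segs.flatMap pvSegDeltas)).1,
       (pvEnd (cx, cy) (segs.flatMap pvSegDeltas)).2,
       path ++ pvScan (cx, cy) (segs.flatMap pvSegDeltas)) := by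
  induction segs with
  | nil => intro cx cy path; simp [pvEnd, pvScan]
  | cons s segs ih =>
      intro cx cy path
      rw [List.foldl_cons, pvStepA_eq, ih]
      simp [List.flatMap_cons, pvEnd_append, pvScan_append]

theorem pvStepB_eq (p : List (Int × Int)) (c d : Int × Int) (hc : p.getLast? = some c) :
    pvStepB p d = p ++ [(c.1 + d.1, c.2 + d.2)] := by
  simp [pvStepB, hc]

-- B's scan loop produces the scan from the last element of the accumulator
theorem pvFoldB_eq (ds : List (Int × Int)) : ∀ (p : List (Int × Int)) (c : Int × Int),
    p.getLast? = some c → ds.foldl pvStepB p = p ++ pvScan c ds := by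
  induction ds with
  | nil => intro p c _; simp [pvScan]
  | cons d ds ih =>
      intro p c hc
      rw [List.foldl_cons, pvStepB_eq p c d hc,
        ih (p ++ [(c.1 + d.1, c.2 + d.2)]) (c.1 + d.1, c.2 + d.2) (by simp)]
      simp [pvScan]

-- ===== VERDICT (by name: the statement is the Claim_ definition above) =====
theorem segment_to_path_spec : Claim_equal_segment_to_path := by
  intro segs sp _
  unfold Spec_segment_to_path segment_to_path segment_to_path_alt
  rw [PySem.List.foldl_append_eq_flatMap]
  show _ = List.foldl pvStepB [sp] ([] ++ segs.flatMap pvSegDeltas)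
  rw [List.nil_append, pvFoldB_eq (segs.flatMap pvSegDeltas) [sp] sp (by simp)]
  by_cases h : segs.length = 0
  · rcases List.eq_nil_of_length_eq_zero h with rfl
    simp [pvScan]
  · simp only [if_neg h, pvFoldA_eq]
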